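-- pv_equiv track=rewrite | github.com/MikeD89/Advent2020 | code/utils.py | join_string_line_sets_to_map
-- ===== SOURCE A (Python) =====
-- def join_string_line_sets_to_map(data):
--     curr = ""
--     retVal = []
--
--     # fun to bank line
--     def bank(line):
--         # bank
--         keyValue = line.strip().split(" ")
--         d = dict(s.split(":") for s in keyValue)
--         retVal.append(d)
--
--     for line in data:
--         curr += line + " "
--         if not line:
--             bank(curr)
--             curr = ""
--
--     # dont forget the last one
--     bank(curr)
--
--     return retVal
-- ===== SOURCE B (Python) =====
-- def join_string_line_sets_to_map(data):
--     # locate the blank separator lines by index, then parse each index slice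
--     cuts = [i for i, line in enumerate(data) if not line]
--     starts = [0] + [c + 1 for c in cuts]
--     ends = cuts + [len(data)]
--     return [dict(tok.split(":") for tok in " ".join(data[s:e]).strip().split(" "))
--             for s, e in zip(starts, ends)]
-- ===== Notes on version B (the rewrite author's own statement) =====
-- stated objective: alternative
-- what changed: A makes one streaming pass, accumulating a string buffer and banking it into a dict at each blank line via a nested closure; B keeps no accumulator at all: it first computes the index positions of the blank lines, derives the (start, end) boundary pairs, and maps the parse step (join, strip, split, dict) over the index slices data[s:e].
import Mathlib
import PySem

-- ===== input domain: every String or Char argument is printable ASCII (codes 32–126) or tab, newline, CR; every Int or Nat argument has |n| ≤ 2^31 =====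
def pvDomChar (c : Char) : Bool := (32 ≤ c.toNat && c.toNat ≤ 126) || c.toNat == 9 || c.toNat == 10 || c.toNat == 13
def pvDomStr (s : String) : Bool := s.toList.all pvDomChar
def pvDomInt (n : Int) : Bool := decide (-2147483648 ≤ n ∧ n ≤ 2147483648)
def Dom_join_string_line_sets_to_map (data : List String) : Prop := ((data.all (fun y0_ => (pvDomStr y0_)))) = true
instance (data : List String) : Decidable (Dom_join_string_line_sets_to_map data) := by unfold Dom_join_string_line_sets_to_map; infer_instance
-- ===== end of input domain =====

-- B replaces A's streaming string-buffer banking by an index-based plan: compute the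
-- positions of the blank lines, derive (start, end) boundary pairs, and parse the
-- index slices; return values proved equal.

-- ===== PORT A =====
-- A's inner 'bank': strip, split on ' ', build the dict from s.split(':') pairs
-- (the non-[k,v] match arm is where Python's dict(...) raises ValueError — excluded by Pre_).
def pvBank (curr : String) : List (String × String) :=
  let keyValue := (PySem.Str.split? (PySem.Str.strip curr) " ").getD []
  (keyValue.foldl (fun d s =>
      match PySem.Str.split? s ":" with
      | some [k, v] => PySem.Dict.insert d k v
      | _ => d) (PySem.Dict.empty : PySem.Dict String String)).items

def join_string_line_sets_to_map (data : List String) : List (List (String × String)) :=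
  let st := data.foldl
    (fun (st : String × List (List (String × String))) line =>
      let curr := st.1 ++ (line ++ " ")
      if line = "" then ("", st.2 ++ [pvBank curr]) else (curr, st.2))
    ("", [])
  st.2 ++ [pvBank st.1]

-- ===== PORT B =====
-- parse one slice of lines into a dict: " ".join, strip, split on ' ', dict of split(':')
def pvParseGroup (g : List String) : List (String × String) :=
  let keyValue := (PySem.Str.split? (PySem.Str.strip (PySem.Str.join " " g)) " ").getD []
  (keyValue.foldl (fun d s =>
      match PySem.Str.split? s ":" with
      | some [k, v] => PySem.Dict.insert d k v
      | _ => d) (PySem.Dict.empty : PySem.Dict String String)).items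

def join_string_line_sets_to_map_alt (data : List String) : List (List (String × String)) :=
  let cuts := ((PySem.List.enumerate data 0).filter (fun p => p.2 == "")).map (fun p => p.1)
  let starts := [(0 : Int)] ++ cuts.map (· + 1)
  let ends := cuts ++ [(data.length : Int)]
  (starts.zip ends).map (fun se =>
    pvParseGroup (PySem.List.slice data (some se.1) (some se.2)))

-- ===== PRECONDITION & SPEC =====
-- Pre_ admits exactly the inputs on which the Python A returns: in every blank-separated
-- group of lines, every space-separated token of the joined, stripped group contains
-- exactly one ':' (otherwise Python's dict(s.split(":") …) raises ValueError; in
-- particular empty input and empty groups are excluded, their only token being '').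
def Pre_join_string_line_sets_to_map (data : List String) : Prop :=
  ∀ g ∈ data.splitOn "",
    ∀ t ∈ (PySem.Str.split? (PySem.Str.strip (PySem.Str.join " " g)) " ").getD [],
      PySem.Str.count t ":" = 1

instance (data : List String) : Decidable (Pre_join_string_line_sets_to_map data) := by
  unfold Pre_join_string_line_sets_to_map; infer_instance

def pvWitness_join_string_line_sets_to_map : List String := ["a:1 b:2", "", "c:3"]

def Spec_join_string_line_sets_to_map (data : List String) (out : List (List (String × String))) : Prop := out = join_string_line_sets_to_map_alt data
instance (data : List String) (out : List (List (String × String))) : Decidable (Spec_join_string_line_sets_to_map data out) := by unfold Spec_join_string_line_sets_to_map; infer_instance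

-- ===== CLAIM (what is proved, stated in full; the proofs are below) =====
def Claim_equal_join_string_line_sets_to_map : Prop := ∀ (data : List String), Dom_join_string_line_sets_to_map data → Pre_join_string_line_sets_to_map data → Spec_join_string_line_sets_to_map data (join_string_line_sets_to_map data)

-- ===== LEMMAS AND PROOFS =====

-- A's fold body, named for the proofs (definitionally the port's lambda)
def pvFA (st : String × List (List (String × String))) (line : String) :
    String × List (List (String × String)) :=
  let curr := st.1 ++ (line ++ " ")
  if line = "" then ("", st.2 ++ [pvBank curr]) else (curr, st.2)

-- prepend lines to the first group
def pvConsHead (cur : List String) : List (List String) → List (List String)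
  | [] => [cur]
  | g :: gs => (cur ++ g) :: gs

-- the blank-separated groups of lines, recursively (final group always present)
def pvGroups : List String → List (List String)
  | [] => [[]]
  | l :: rest => if l = "" then [] :: pvGroups rest else pvConsHead [l] (pvGroups rest)

lemma pvGroups_ne_nil (d : List String) : pvGroups d ≠ [] := by
  cases d with
  | nil => simp [pvGroups]
  | cons l r =>
      simp only [pvGroups]
      split_ifs
      · simp
      · cases pvGroups r <;> simp [pvConsHead]

-- the string A's accumulator holds after the lines of `g` have been appended
def pvCurrOf (g : List String) : String :=
  g.foldl (fun c l => c ++ (l ++ " ")) ""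

lemma pvCurrOf_append_singleton (g : List String) (l : String) :
    pvCurrOf (g ++ [l]) = pvCurrOf g ++ (l ++ " ") := by
  simp [pvCurrOf]

-- dropping one trailing space does not change rstrip / strip
lemma pvChars_rstrip_append_space (cs : List Char) :
    PySem.Chars.rstrip (cs ++ [' ']) = PySem.Chars.rstrip cs := by
  simp [PySem.Chars.rstrip, PySem.Chars.isspace]

lemma pvChars_strip_append_space (cs : List Char) :
    PySem.Chars.strip (cs ++ [' ']) = PySem.Chars.strip cs := by
  simp only [PySem.Chars.strip, PySem.Chars.lstrip, List.dropWhile_append]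
  by_cases h : (List.dropWhile PySem.Chars.isspace cs).isEmpty
  · have h1 : List.dropWhile PySem.Chars.isspace [' '] = [] := by decide
    rw [if_pos h, h1]
    rw [List.isEmpty_iff] at h
    rw [h]
  · rw [if_neg h]
    exact pvChars_rstrip_append_space _

lemma pvStr_strip_append_space {s t : String} (h : s.toList = t.toList ++ [' ']) :
    PySem.Str.strip s = PySem.Str.strip t := by
  simp [PySem.Str.strip, h, pvChars_strip_append_space]

lemma pvBank_congr {s t : String} (h : PySem.Str.strip s = PySem.Str.strip t) :
    pvBank s = pvBank t := by
  simp [pvBank, h]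

lemma pvCurrOf_toList (g : List String) :
    (pvCurrOf g).toList = g.foldl (fun c l => c ++ l.toList ++ [' ']) ([] : List Char) := by
  suffices h : ∀ (s : String),
      (g.foldl (fun c l => c ++ (l ++ " ")) s).toList =
        g.foldl (fun c l => c ++ l.toList ++ [' ']) s.toList by
    simpa using h ""
  induction g with
  | nil => intro s; simp
  | cons x r ih =>
      intro s
      simp only [List.foldl_cons, ih, String.toList_append]
      congr 1
      rw [show (" " : String).toList = [' '] from rfl, List.append_assoc]

lemma pvFoldl_chars_join (ls : List (List Char)) (c : List Char) :
    ls.foldl (fun c l => c ++ l ++ [' ']) c =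
      c ++ ls.foldl (fun c l => c ++ l ++ [' ']) [] := by
  induction ls generalizing c with
  | nil => simp
  | cons x r ih =>
      simp only [List.foldl_cons]
      rw [ih (c ++ x ++ [' ']), ih ([] ++ x ++ [' '])]
      simp

lemma pvJoinTrail_eq (x : List Char) (ls : List (List Char)) :
    (x :: ls).foldl (fun c l => c ++ l ++ [' ']) [] =
      PySem.Chars.join [' '] (x :: ls) ++ [' '] := by
  induction ls generalizing x with
  | nil => simp [PySem.Chars.join, List.intercalate]
  | cons y r ih =>
      rw [List.foldl_cons, pvFoldl_chars_join (y :: r) ([] ++ x ++ [' ']), ih y,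
        PySem.Chars.join_cons_cons]
      simp

lemma pvStrip_joinTrail (ls : List (List Char)) :
    PySem.Chars.strip (ls.foldl (fun c l => c ++ l ++ [' ']) []) =
      PySem.Chars.strip (PySem.Chars.join [' '] ls) := by
  cases ls with
  | nil => simp [PySem.Chars.join, List.intercalate]
  | cons x r => rw [pvJoinTrail_eq, pvChars_strip_append_space]

lemma pvBank_currOf (g : List String) :
    pvBank (pvCurrOf g) = pvParseGroup g := by
  have hrfl : pvParseGroup g = pvBank (PySem.Str.join " " g) := rfl
  rw [hrfl]
  apply pvBank_congr
  simp only [PySem.Str.strip, PySem.Str.join, String.toList_ofList]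
  rw [pvCurrOf_toList, ← List.foldl_map (f := String.toList)
      (g := fun (c : List Char) (l : List Char) => c ++ l ++ [' '])]
  rw [pvStrip_joinTrail]
  rfl

-- A's fold invariant against the recursive grouping
lemma pvMainA (data : List String) (cur : List String) (gs : List (List String)) :
    (data.foldl pvFA (pvCurrOf cur, gs.map (fun g => pvBank (pvCurrOf g)))).2
        ++ [pvBank (data.foldl pvFA (pvCurrOf cur, gs.map (fun g => pvBank (pvCurrOf g)))).1]
      = (gs ++ pvConsHead cur (pvGroups data)).map (fun g => pvBank (pvCurrOf g)) := by
  induction data generalizing cur gs with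
  | nil => cases gs <;> simp [pvGroups, pvConsHead]
  | cons line rest ih =>
      by_cases hl : line = ""
      · subst hl
        have hA : pvFA (pvCurrOf cur, gs.map (fun g => pvBank (pvCurrOf g))) ""
            = (pvCurrOf [], (gs ++ [cur]).map (fun g => pvBank (pvCurrOf g))) := by
          simp only [pvFA, pvCurrOf]
          simp
          apply pvBank_congr
          apply pvStr_strip_append_space
          rw [String.toList_append]
          rfl
        simp only [List.foldl_cons, hA]
        rw [ih [] (gs ++ [cur])]
        simp only [pvGroups, if_true]
        rcases hg : pvGroups rest with _ | ⟨g, gs'⟩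
        · exact absurd hg (pvGroups_ne_nil rest)
        · simp [pvConsHead]
      · have hA : pvFA (pvCurrOf cur, gs.map (fun g => pvBank (pvCurrOf g))) line
            = (pvCurrOf (cur ++ [line]), gs.map (fun g => pvBank (pvCurrOf g))) := by
          simp [pvFA, hl, pvCurrOf_append_singleton]
        simp only [List.foldl_cons, hA]
        rw [ih (cur ++ [line]) gs]
        simp only [pvGroups, if_neg hl]
        congr 2
        cases pvGroups rest <;> simp [pvConsHead]

-- the Nat-valued blank-line positions, recursively
def pvCutsN : List String → List Nat
  | [] => []
  | l :: rest => if l = "" then 0 :: (pvCutsN rest).map (· + 1)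
                 else (pvCutsN rest).map (· + 1)

-- B's enumerate/filter/map computes exactly pvCutsN (shifted by the start value)
lemma pvCuts_eq_aux (data : List String) (s : Int) :
    ((PySem.List.enumerate data s).filter (fun p => p.2 == "")).map (fun p => p.1)
      = (pvCutsN data).map (fun n => Int.ofNat n + s) := by
  induction data generalizing s with
  | nil => simp [PySem.List.enumerate_nil, pvCutsN]
  | cons l rest ih =>
      rw [PySem.List.enumerate_cons]
      by_cases hl : l = ""
      · subst hl
        simp only [pvCutsN, List.filter_cons]
        simp only [beq_self_eq_true, if_true, List.map_cons, ih (s + 1), List.map_map]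
        congr 1
        · simp [Int.ofNat_eq_natCast]
        · apply List.map_congr_left; intro n _; simp only [Function.comp, Int.ofNat_eq_natCast]; push_cast; ring
      · simp only [pvCutsN, if_neg hl, List.filter_cons]
        have hb : (l == "") = false := by simpa using hl
        simp only [hb, Bool.false_eq_true, if_false, ih (s + 1), List.map_map]
        apply List.map_congr_left; intro n _; simp only [Function.comp, Int.ofNat_eq_natCast]; push_cast; ring

-- the slice groups over Nat boundary pairs
def pvSliceG (data : List String) : List (List String) :=
  (((0 :: (pvCutsN data).map (· + 1)).zip ((pvCutsN data) ++ [data.length])).map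
    (fun p => ((data.drop p.1).take (p.2 - p.1))))

lemma pvShiftPairs (x : String) (rest : List String) (ps : List (Nat × Nat)) :
    (ps.map (fun p => (p.1 + 1, p.2 + 1))).map
        (fun p => (((x :: rest).drop p.1).take (p.2 - p.1)))
      = ps.map (fun p => ((rest.drop p.1).take (p.2 - p.1))) := by
  rw [List.map_map]
  apply List.map_congr_left
  intro p _
  simp [Nat.succ_sub_succ]

lemma pvTail (x : String) (rest : List String) (a : Nat) (as bs : List Nat) :
    (((a + 1) :: as.map (· + 1)).zip (bs.map (· + 1))).map
        (fun p => (((x :: rest).drop p.1).take (p.2 - p.1)))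
      = ((a :: as).zip bs).map (fun p => ((rest.drop p.1).take (p.2 - p.1))) := by
  have h : ((a + 1) :: as.map (· + 1)) = ((a :: as).map (· + 1)) := rfl
  rw [h, List.zip_map, show (Prod.map (· + 1) (· + 1) : Nat × Nat → Nat × Nat)
      = (fun p => (p.1 + 1, p.2 + 1)) from funext (fun p => by cases p; rfl), pvShiftPairs]

lemma pvSliceG_eq_groups (data : List String) : pvSliceG data = pvGroups data := by
  induction data with
  | nil => simp [pvSliceG, pvCutsN, pvGroups]
  | cons l rest ih =>
      by_cases hl : l = ""
      · subst hl
        simp only [pvSliceG, pvCutsN, pvGroups, if_true, List.length_cons, List.map_cons,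
          List.cons_append, List.zip_cons_cons]
        rw [← ih]
        simp only [pvSliceG]
        congr 1
        have e2 : (((pvCutsN rest).map (· + 1)) ++ [rest.length + 1])
            = ((pvCutsN rest) ++ [rest.length]).map (· + 1) := by simp
        try rw [← List.map_map]
        rw [e2]
        exact pvTail "" rest 0 ((pvCutsN rest).map (· + 1)) ((pvCutsN rest) ++ [rest.length])
      · simp only [pvSliceG, pvCutsN, pvGroups, if_neg hl]
        rw [← ih]
        cases hc : pvCutsN rest with
        | nil =>
            simp [pvSliceG, hc, pvConsHead]
        | cons c0 cr =>
            simp only [pvSliceG, hc, List.map_cons, List.cons_append, List.length_cons,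
              List.zip_cons_cons, pvConsHead]
            congr 1
            have e2 : ((cr.map (· + 1)) ++ [rest.length + 1])
                = (cr ++ [rest.length]).map (· + 1) := by simp
            try rw [← List.map_map]
            rw [e2]
            exact pvTail l rest (c0 + 1) (cr.map (· + 1)) (cr ++ [rest.length])

-- B's port computes the map of pvParseGroup over pvSliceG
lemma pvAlt_eq (data : List String) :
    join_string_line_sets_to_map_alt data = (pvSliceG data).map pvParseGroup := by
  show (( [(0:Int)] ++ (((PySem.List.enumerate data 0).filter (fun p : Int × String => p.2 == "")).map (fun p : Int × String => p.1)).map (· + 1)).zip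
      ((((PySem.List.enumerate data 0).filter (fun p : Int × String => p.2 == "")).map (fun p : Int × String => p.1)) ++ [(data.length : Int)])).map
      (fun se : Int × Int => pvParseGroup (PySem.List.slice data (some se.1) (some se.2)))
    = (pvSliceG data).map pvParseGroup
  rw [pvCuts_eq_aux data 0]
  unfold pvSliceG
  have hc : (pvCutsN data).map (fun n => Int.ofNat n + 0)
      = (pvCutsN data).map (fun n : Nat => (n : Int)) := by
    simp [Int.ofNat_eq_natCast]
  rw [hc]
  have hs : ([(0:Int)] ++ ((pvCutsN data).map (fun n : Nat => (n : Int))).map (· + 1))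
      = ((0 :: (pvCutsN data).map (· + 1)).map (fun n : Nat => (n : Int))) := by
    simp only [List.map_map, List.map_cons, List.singleton_append, Nat.cast_zero]
    congr 1
  have he : (((pvCutsN data).map (fun n : Nat => (n : Int))) ++ [(data.length : Int)])
      = (((pvCutsN data) ++ [data.length]).map (fun n : Nat => (n : Int))) := by
    simp
  rw [hs, he, List.zip_map, List.map_map, List.map_map]
  apply List.map_congr_left
  intro p _
  simp only [Function.comp, Prod.map]
  rw [PySem.List.slice_natCast]

lemma pvGroups_map_eq (data : List String) :
    (pvGroups data).map (fun g => pvBank (pvCurrOf g)) = (pvGroups data).map pvParseGroup :=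
  List.map_congr_left (fun g _ => pvBank_currOf g)

-- ===== VERDICT (by name: the statement is the Claim_ definition above) =====
theorem join_string_line_sets_to_map_spec : Claim_equal_join_string_line_sets_to_map := by
  intro data _ _
  show join_string_line_sets_to_map data = join_string_line_sets_to_map_alt data
  have h := pvMainA data [] []
  simp only [show pvCurrOf [] = "" from rfl, List.map_nil, List.nil_append] at h
  have e1 : join_string_line_sets_to_map data
      = (data.foldl pvFA ("", [])).2 ++ [pvBank (data.foldl pvFA ("", [])).1] := rfl
  have hch : pvConsHead [] (pvGroups data) = pvGroups data := by
    rcases hg : pvGroups data with _ | ⟨g, gs⟩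
    · exact absurd hg (pvGroups_ne_nil data)
    · simp [pvConsHead]
  rw [e1, h, hch, pvGroups_map_eq, pvAlt_eq, pvSliceG_eq_groups]
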